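-- pv_equiv track=rewrite | github.com/alainrk/pythonChallenges | algex/numbersOfPi.py | helper
-- ===== SOURCE A (Python) =====
-- def helper(pi, dictionary, memo):
-- 	if pi in memo:
-- 		return memo[pi]
-- 	if pi in dictionary:
-- 		memo[pi] = 0
-- 		return memo[pi]
-- 	if len(pi) == 1:
-- 		memo[pi] = -1
-- 		return memo[pi]
--
-- 	minSpaces = float('inf')
-- 	for idx in range(1, len(pi)):
-- 		if pi[:idx] in dictionary:
-- 			res = helper(pi[idx:], dictionary, memo)
-- 			if res > -1:
-- 				minSpaces = min(minSpaces, res)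
-- 	memo[pi] = -1 if minSpaces > len(pi) else 1 + minSpaces
-- 	return memo[pi]
-- ===== SOURCE B (Python) =====
-- # Bottom-up DP over the suffixes of pi (back to front) instead of A's memoized
-- # top-down recursion, scanning only prefixes no longer than the longest
-- # dictionary word; return value only -- A also mutates `memo`, B does not.
-- def helper(pi, dictionary, memo):
--     n = len(pi)
--     maxw = 0
--     for w in dictionary:
--         maxw = max(maxw, len(w))
--
--     def step(s, vals):
--         # vals[j] holds the answer for the suffix s[1 + j:]
--         if s in memo:
--             return memo[s]
--         if s in dictionary:
--             return 0
--         best = None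
--         for j, v in enumerate(vals[:maxw]):
--             if v > -1 and s[:1 + j] in dictionary:
--                 best = v if best is None else min(best, v)
--         if best is None or best > len(s):
--             return -1
--         return 1 + best
--
--     vals = []  # answers for the suffixes pi[i+1:], ..., pi[n-1:]
--     for i in range(n - 1, 0, -1):
--         vals = [step(pi[i:], vals)] + vals
--     return step(pi, vals)
-- ===== Notes on version B (the rewrite author's own statement) =====
-- stated objective: faster
-- what changed: Replaces A's memoized top-down recursion (which rescans every split of every reachable suffix and mutates the memo dict) by an iterative bottom-up DP over the suffixes of pi, built back to front, whose inner scan is capped at the longest dictionary word; the given memo is consulted read-only.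
import Mathlib
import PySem

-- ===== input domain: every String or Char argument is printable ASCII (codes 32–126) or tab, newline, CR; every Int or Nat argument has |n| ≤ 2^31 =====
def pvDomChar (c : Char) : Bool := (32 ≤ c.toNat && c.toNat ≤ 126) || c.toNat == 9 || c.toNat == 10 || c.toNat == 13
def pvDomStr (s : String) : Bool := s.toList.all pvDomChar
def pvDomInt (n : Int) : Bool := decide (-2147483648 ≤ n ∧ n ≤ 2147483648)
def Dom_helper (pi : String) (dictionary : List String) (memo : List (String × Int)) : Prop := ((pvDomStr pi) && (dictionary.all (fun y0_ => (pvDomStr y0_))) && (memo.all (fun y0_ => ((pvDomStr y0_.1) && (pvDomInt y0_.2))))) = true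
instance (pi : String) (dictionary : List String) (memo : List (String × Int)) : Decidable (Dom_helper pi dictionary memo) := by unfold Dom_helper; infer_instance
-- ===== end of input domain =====

-- B replaces A's memoized top-down recursion by a bottom-up DP over the suffixes of pi,
-- scanning only prefixes no longer than the longest dictionary word; the equivalence is
-- about the RETURN value only (A also mutates the memo dict in place, B does not).

-- ===== PORT A =====
-- A's recursion, with the mutated memo dict threaded through explicitly
-- (Python's float('inf') accumulator is modelled as `none`; min(inf, r) = r).
-- A's `for idx in range(1, len(pi))` loop: threads (minSpaces, memo) through the
-- range, `rec` is the recursive call on the suffix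
def loopA (dictionary : List String)
    (rec : String → PySem.Dict String Int → Int × PySem.Dict String Int)
    (pi : String) (a : Int) (acc : Option Int) (m : PySem.Dict String Int) :
    Option Int × PySem.Dict String Int :=
  (PySem.List.pyRange a (PySem.Str.len pi) 1).foldl
    (fun (st : Option Int × PySem.Dict String Int) (idx : Int) =>
      if dictionary.contains (PySem.Str.slice pi none (some idx)) then
        let r := rec (PySem.Str.slice pi (some idx) none) st.2
        if r.1 > -1 then
          (some (match st.1 with | none => r.1 | some m => min m r.1), r.2)
        else (st.1, r.2)
      else st) (acc, m)

-- A's recursion, with the mutated memo dict threaded through explicitly; `fuel` is a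
-- structural-termination guard only (helper passes more than |pi|, so it never runs out);
-- Python's float('inf') accumulator is modelled as `none` (min(inf, r) = r).
def helperAux (dictionary : List String) :
    Nat → String → PySem.Dict String Int → Int × PySem.Dict String Int
  | 0, _, memo => (0, memo)
  | fuel + 1, pi, memo =>
    match memo.get? pi with
    | some v => (v, memo)
    | none =>
      if dictionary.contains pi then (0, memo.insert pi 0)
      else if PySem.Str.len pi = 1 then (-1, memo.insert pi (-1))
      else
        let st := loopA dictionary (fun q mm => helperAux dictionary fuel q mm) pi 1 none memo
        match st.1 with
        | none => (-1, st.2.insert pi (-1))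
        | some m =>
          let v := if m > PySem.Str.len pi then -1 else 1 + m
          (v, st.2.insert pi v)

def helper (pi : String) (dictionary : List String) (memo : List (String × Int)) : Int :=
  (helperAux dictionary (pi.toList.length + 1) pi (PySem.Dict.ofList memo)).1

-- ===== PORT B =====
-- Source B's `step(s, vals)`: answer for the suffix s, given the answers `vals` for the
-- nonempty proper suffixes of s (Python strings handled as their char lists; exact).
def altStep (dictionary : List String) (md : PySem.Dict String Int) (maxw : Int)
    (s : List Char) (vals : List Int) : Int :=
  match md.get? (String.ofList s) with
  | some v => v
  | none =>
    if dictionary.contains (String.ofList s) then 0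
    else
      let best := (PySem.List.enumerate (PySem.List.slice vals none (some maxw)) 0).foldl
        (fun (best : Option Int) jv =>
          if jv.2 > -1 ∧ dictionary.contains (String.ofList (PySem.Chars.slice s none (some (1 + jv.1)))) then
            some (match best with | none => jv.2 | some m => min m jv.2)
          else best) none
      match best with
      | none => -1
      | some m => if m > PySem.Chars.len s then -1 else 1 + m

-- Source B's back-to-front loop `vals = [step(pi[i:], vals)] + vals` over i = n-1 .. 1:
-- the same construction, as structural recursion over the char-list tails.
def altBuild (dictionary : List String) (md : PySem.Dict String Int) (maxw : Int) :
    List Char → List Int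
  | [] => []
  | c :: r => altStep dictionary md maxw (c :: r) (altBuild dictionary md maxw r)
                :: altBuild dictionary md maxw r

def helper_alt (pi : String) (dictionary : List String) (memo : List (String × Int)) : Int :=
  let md := PySem.Dict.ofList memo
  let maxw := dictionary.foldl (fun a w => max a (PySem.Str.len w)) 0
  altStep dictionary md maxw pi.toList (altBuild dictionary md maxw pi.toList.tail)

-- ===== PRECONDITION & SPEC =====
def Spec_helper (pi : String) (dictionary : List String) (memo : List (String × Int)) (out : Int) : Prop := out = helper_alt pi dictionary memo
instance (pi : String) (dictionary : List String) (memo : List (String × Int)) (out : Int) : Decidable (Spec_helper pi dictionary memo out) := by unfold Spec_helper; infer_instance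

-- ===== CLAIM (what is proved, stated in full; the proofs are below) =====
def Claim_equal_helper : Prop := ∀ (pi : String) (dictionary : List String) (memo : List (String × Int)), Dom_helper pi dictionary memo → Spec_helper pi dictionary memo (helper pi dictionary memo)

-- ===== LEMMAS AND PROOFS =====

-- B's answer for a suffix, as a function of the char list.
def Wv (dictionary : List String) (md : PySem.Dict String Int) (maxw : Int) (l : List Char) : Int :=
  altStep dictionary md maxw l (altBuild dictionary md maxw l.tail)

-- running minimum, `none` = Python's float('inf')
def minList (acc : Option Int) : List Int → Option Int
  | [] => acc
  | v :: t => minList (some (match acc with | none => v | some m => min m v)) t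

-- A's final `-1 if minSpaces > len(pi) else 1 + minSpaces`
def capv (n : Nat) : Option Int → Int
  | none => -1
  | some m => if m > (n : Int) then -1 else 1 + m

-- the split positions of l contributing to the minimum, with their values
def candsFrom (dictionary : List String) (md : PySem.Dict String Int) (maxw : Int)
    (l : List Char) (a c : Nat) : List Int :=
  ((List.range' a c).filter (fun idx =>
      dictionary.contains (String.ofList (l.take idx)) && decide (Wv dictionary md maxw (l.drop idx) > -1))).map
    (fun idx => Wv dictionary md maxw (l.drop idx))

-- memo states reachable from `md`: every binding is either original or a correct value
def Good (dictionary : List String) (md : PySem.Dict String Int) (maxw : Int)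
    (m : PySem.Dict String Int) : Prop :=
  ∀ k : String, m.get? k = md.get? k ∨
    (md.get? k = none ∧ m.get? k = some (Wv dictionary md maxw k.toList))

theorem minList_cons (acc : Option Int) (v : Int) (t : List Int) :
    minList acc (v :: t) = minList (some (match acc with | none => v | some m => min m v)) t := rfl

theorem candsFrom_succ (dictionary md maxw) (l : List Char) (a c : Nat) :
    candsFrom dictionary md maxw l a (c+1) =
      if dictionary.contains (String.ofList (l.take a)) = true ∧ Wv dictionary md maxw (l.drop a) > -1 then
        Wv dictionary md maxw (l.drop a) :: candsFrom dictionary md maxw l (a+1) c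
      else candsFrom dictionary md maxw l (a+1) c := by
  by_cases h : dictionary.contains (String.ofList (l.take a)) = true ∧ Wv dictionary md maxw (l.drop a) > -1
  · rw [if_pos h, candsFrom, List.range'_succ, List.filter_cons,
        if_pos (by simp only [Bool.and_eq_true, decide_eq_true_eq]; exact h), List.map_cons]
    rfl
  · rw [if_neg h, candsFrom, List.range'_succ, List.filter_cons,
        if_neg (by simp only [Bool.and_eq_true, decide_eq_true_eq]; exact h)]
    rfl

theorem candsFrom_ext (dictionary md maxw) (l : List Char) (a c c' : Nat) (hcc : c ≤ c')
    (h : ∀ idx, a + c ≤ idx → idx < a + c' →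
        dictionary.contains (String.ofList (l.take idx)) = false) :
    candsFrom dictionary md maxw l a c' = candsFrom dictionary md maxw l a c := by
  unfold candsFrom
  have hsplit : List.range' a c' = List.range' a c ++ List.range' (a + c) (c' - c) := by
    have h1 := List.range'_append (s := a) (m := c) (n := c' - c) (step := 1)
    simp only [one_mul] at h1
    rw [h1]
    congr 1
    omega
  rw [hsplit, List.filter_append]
  have : (List.range' (a + c) (c' - c)).filter (fun idx =>
      dictionary.contains (String.ofList (l.take idx)) && decide (Wv dictionary md maxw (l.drop idx) > -1)) = [] := by
    apply List.filter_eq_nil_iff.mpr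
    intro idx hidx
    have hb := List.mem_range'_1.mp hidx
    rw [h idx (by omega) (by omega)]
    simp
  rw [this, List.append_nil]

theorem foldB (dictionary md maxw) (l : List Char) :
    ∀ (M k : Nat) (acc : Option Int), 1 ≤ k →
      ((PySem.List.enumerate ((altBuild dictionary md maxw (l.drop k)).take M) ((k:Int) - 1)).foldl
        (fun (best : Option Int) jv =>
          if jv.2 > -1 ∧ dictionary.contains (String.ofList (PySem.Chars.slice l none (some (1 + jv.1)))) = true then
            some (match best with | none => jv.2 | some m => min m jv.2)
          else best) acc)
      = minList acc (candsFrom dictionary md maxw l k (min M (l.length - k))) := by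
  intro M
  induction M with
  | zero =>
    intro k acc _
    simp [candsFrom, minList]
  | succ M ih =>
    intro k acc hk
    cases hdrop : l.drop k with
    | nil =>
      have hlen : l.length ≤ k := List.drop_eq_nil_iff.mp hdrop
      have h0 : l.length - k = 0 := by omega
      simp [altBuild, h0, candsFrom, minList]
    | cons c rest =>
      have hklen : k < l.length := by
        by_contra hcon
        have h0 : l.drop k = [] := List.drop_eq_nil_iff.mpr (by omega)
        rw [hdrop] at h0
        simp at h0
      have hrest : l.drop (k+1) = rest := by
        rw [List.drop_add_one_eq_tail_drop, hdrop]
        rfl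
      have hWv : altStep dictionary md maxw (c :: rest) (altBuild dictionary md maxw rest)
          = Wv dictionary md maxw (l.drop k) := by
        rw [Wv, hdrop]
        rfl
      have hAB : altBuild dictionary md maxw (c :: rest)
          = altStep dictionary md maxw (c :: rest) (altBuild dictionary md maxw rest)
              :: altBuild dictionary md maxw rest := rfl
      rw [hAB]
      rw [List.take_succ_cons]
      rw [PySem.List.enumerate_cons]
      rw [List.foldl_cons]
      rw [hWv]
      have hsl : PySem.Chars.slice l none (some (1 + ((k:Int) - 1))) = l.take k := by
        have : (1 : Int) + ((k:Int) - 1) = ((k : Nat) : Int) := by ring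
        rw [this, PySem.Chars.slice_eq_listSlice, PySem.List.slice_to_natCast]
      have hmin : min (M + 1) (l.length - k) = min M (l.length - (k+1)) + 1 := by omega
      have hstart : (k:Int) - 1 + 1 = ((k+1:Nat):Int) - 1 := by push_cast; ring
      rw [hsl, hmin, candsFrom_succ, hstart, ← hrest]
      by_cases hcond : Wv dictionary md maxw (l.drop k) > -1 ∧
          dictionary.contains (String.ofList (l.take k)) = true
      · rw [if_pos hcond, if_pos ⟨hcond.2, hcond.1⟩, minList_cons]
        exact ih (k+1) _ (by omega)
      · rw [if_neg hcond, if_neg (fun h => hcond ⟨h.2, h.1⟩)]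
        exact ih (k+1) _ (by omega)

theorem W_eq (dictionary md maxw) (hmax0 : 0 ≤ maxw)
    (hmax : ∀ w ∈ dictionary, (w.toList.length : Int) ≤ maxw) (l : List Char) :
    Wv dictionary md maxw l =
      match md.get? (String.ofList l) with
      | some v => v
      | none =>
        if dictionary.contains (String.ofList l) then 0
        else capv l.length (minList none (candsFrom dictionary md maxw l 1 (l.length - 1))) := by
  rw [Wv, altStep]
  cases hmd : md.get? (String.ofList l) with
  | some v => rfl
  | none =>
    by_cases hd : dictionary.contains (String.ofList l) = true
    · simp only [if_pos hd]
    · simp only [if_neg hd]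
      have hsl : PySem.List.slice (altBuild dictionary md maxw l.tail) none (some maxw)
          = (altBuild dictionary md maxw (l.drop 1)).take maxw.toNat := by
        rw [PySem.List.slice_to _ hmax0, List.drop_one]
      have h0 : (0 : Int) = ((1:Nat):Int) - 1 := by norm_num
      rw [hsl, h0, foldB dictionary md maxw l maxw.toNat 1 none le_rfl]
      have hc : candsFrom dictionary md maxw l 1 (min maxw.toNat (l.length - 1))
          = candsFrom dictionary md maxw l 1 (l.length - 1) := by
        rcases Nat.lt_or_ge maxw.toNat (l.length - 1) with h | h
        swap
        · rw [Nat.min_eq_right h]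
        · refine (candsFrom_ext dictionary md maxw l 1 _ _ (by omega) ?_).symm
          intro idx h1 h2
          rw [Nat.min_eq_left (by omega)] at h1
          by_contra hcon
          have hct : dictionary.contains (String.ofList (l.take idx)) = true := by
            cases hcc : dictionary.contains (String.ofList (l.take idx))
            · exact absurd hcc hcon
            · rfl
          have hmem : String.ofList (l.take idx) ∈ dictionary := List.mem_of_elem_eq_true hct
          have hlenw := hmax _ hmem
          rw [String.toList_ofList, List.length_take_of_le (by omega)] at hlenw
          omega
      rw [hc]
      cases minList none (candsFrom dictionary md maxw l 1 (l.length - 1)) <;>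
        simp [capv, PySem.Chars.len_eq]

theorem good_lookup (dictionary md maxw m) (h : Good dictionary md maxw m) (s : String) (v : Int)
    (hv : m.get? s = some v) : v = Wv dictionary md maxw s.toList := by
  rcases h s with h' | ⟨_, h'⟩
  · rw [hv] at h'
    rw [Wv, altStep, String.ofList_toList, ← h']
  · rw [hv] at h'
    exact Option.some_inj.mp h'

theorem good_insert (dictionary md maxw m) (h : Good dictionary md maxw m) (s : String)
    (hs : md.get? s = none) :
    Good dictionary md maxw (m.insert s (Wv dictionary md maxw s.toList)) := by
  intro k
  rw [PySem.Dict.get?_insert]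
  by_cases hk : k = s
  · subst hk
    simp [hs]
  · simp only [if_neg hk]
    exact h k

theorem candsFrom_zero (dictionary md maxw) (l : List Char) (a : Nat) :
    candsFrom dictionary md maxw l a 0 = [] := rfl

theorem lemA (dictionary : List String) (md : PySem.Dict String Int) (maxw : Int)
    (rec : String → PySem.Dict String Int → Int × PySem.Dict String Int)
    (pi : String)
    (hIH : ∀ (q : String) (m' : PySem.Dict String Int), q.toList.length < pi.toList.length →
        Good dictionary md maxw m' →
        (rec q m').1 = Wv dictionary md maxw q.toList ∧
          Good dictionary md maxw (rec q m').2) :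
    ∀ (c a : Nat) (acc : Option Int) (m : PySem.Dict String Int), 1 ≤ a →
      pi.toList.length ≤ a + c → Good dictionary md maxw m →
      (loopA dictionary rec pi (a:Int) acc m).1
          = minList acc (candsFrom dictionary md maxw pi.toList a (pi.toList.length - a)) ∧
        Good dictionary md maxw (loopA dictionary rec pi (a:Int) acc m).2 := by
  intro c
  induction c with
  | zero =>
    intro a acc m ha hlen hm
    rw [loopA, PySem.List.pyRange_one_eq_nil (by rw [PySem.Str.len_eq]; omega)]
    have h0 : pi.toList.length - a = 0 := by omega
    rw [h0, candsFrom_zero]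
    exact ⟨rfl, hm⟩
  | succ c ih =>
    intro a acc m ha hlen hm
    by_cases hla : pi.toList.length ≤ a
    · rw [loopA, PySem.List.pyRange_one_eq_nil (by rw [PySem.Str.len_eq]; omega)]
      have h0 : pi.toList.length - a = 0 := by omega
      rw [h0, candsFrom_zero]
      exact ⟨rfl, hm⟩
    · have halen : a < pi.toList.length := by omega
      rw [loopA, PySem.List.pyRange_one_cons (by rw [PySem.Str.len_eq]; omega),
          List.foldl_cons]
      have hpre : PySem.Str.slice pi none (some (a:Int)) = String.ofList (pi.toList.take a) := by
        have h2 : (PySem.Str.slice pi none (some (a:Int))).toList = pi.toList.take a := by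
          rw [PySem.Str.toList_slice, PySem.Chars.slice_eq_listSlice, PySem.List.slice_to_natCast]
        rw [← h2, String.ofList_toList]
      have hq : (PySem.Str.slice pi (some (a:Int)) none).toList = pi.toList.drop a := by
        rw [PySem.Str.toList_slice, PySem.Chars.slice_eq_listSlice, PySem.List.slice_from_natCast]
      have hsplit : pi.toList.length - a = (pi.toList.length - (a+1)) + 1 := by omega
      have hcast : (a:Int) + 1 = ((a+1:Nat):Int) := by push_cast; ring
      rw [hpre, hsplit, candsFrom_succ]
      by_cases hcont : dictionary.contains (String.ofList (pi.toList.take a)) = true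
      · rw [if_pos hcont]
        have hrec := hIH (PySem.Str.slice pi (some (a:Int)) none) m
          (by rw [hq, List.length_drop]; omega) hm
        rw [hq] at hrec
        by_cases hpos : Wv dictionary md maxw (pi.toList.drop a) > -1
        · dsimp only
          rw [hrec.1, if_pos hpos, if_pos (And.intro hcont hpos), minList_cons, hcast]
          exact ih (a+1) _ _ (by omega) (by omega) hrec.2
        · dsimp only
          rw [hrec.1, if_neg hpos, if_neg (fun h => hpos h.2), hcast]
          exact ih (a+1) _ _ (by omega) (by omega) hrec.2
      · rw [if_neg hcont, if_neg (fun h => hcont h.1), hcast]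
        exact ih (a+1) _ _ (by omega) (by omega) hm

theorem thmA (dictionary : List String) (md : PySem.Dict String Int) (maxw : Int)
    (hmax0 : 0 ≤ maxw) (hmax : ∀ w ∈ dictionary, (w.toList.length : Int) ≤ maxw) :
    ∀ (fuel : Nat) (pi : String) (m : PySem.Dict String Int), pi.toList.length < fuel →
      Good dictionary md maxw m →
      (helperAux dictionary fuel pi m).1 = Wv dictionary md maxw pi.toList ∧
        Good dictionary md maxw (helperAux dictionary fuel pi m).2 := by
  intro fuel
  induction fuel with
  | zero => intro pi m hlen hm; omega
  | succ fuel ihf =>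
    intro pi m hlen hm
    rw [helperAux]
    cases hget : m.get? pi with
    | some v => exact ⟨good_lookup dictionary md maxw m hm pi v hget, hm⟩
    | none =>
      have hmd : md.get? pi = none := by
        rcases hm pi with h | ⟨_, h2⟩
        · rw [← h]; exact hget
        · rw [hget] at h2; exact absurd h2 (by simp)
      have hWpi := W_eq dictionary md maxw hmax0 hmax pi.toList
      rw [String.ofList_toList, hmd] at hWpi
      by_cases hd : dictionary.contains pi = true
      · rw [if_pos hd]
        have hv : Wv dictionary md maxw pi.toList = 0 := by rw [hWpi, if_pos hd]
        refine ⟨hv.symm, ?_⟩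
        have := good_insert dictionary md maxw m hm pi hmd
        rwa [hv] at this
      · rw [if_neg hd]
        by_cases h1 : PySem.Str.len pi = 1
        · rw [if_pos h1]
          have hlen1 : pi.toList.length = 1 := by
            have := PySem.Str.len_eq pi
            rw [h1] at this
            exact_mod_cast this.symm
          have hv : Wv dictionary md maxw pi.toList = -1 := by
            rw [hWpi, if_neg hd, hlen1]
            rfl
          refine ⟨hv.symm, ?_⟩
          have := good_insert dictionary md maxw m hm pi hmd
          rwa [hv] at this
        · rw [if_neg h1]
          have hone : ((1:Nat):Int) = (1 : Int) := by norm_num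
          have hlem := lemA dictionary md maxw
            (fun q mm => helperAux dictionary fuel q mm) pi
            (fun q m' hq hm' => ihf q m' (by omega) hm')
            pi.toList.length 1 none m le_rfl (by omega) hm
          rw [hone] at hlem
          have hv : (match (loopA dictionary (fun q mm => helperAux dictionary fuel q mm)
                pi 1 none m).1 with
              | none => (-1 : Int)
              | some mm => if mm > PySem.Str.len pi then -1 else 1 + mm)
              = Wv dictionary md maxw pi.toList := by
            rw [hWpi, if_neg hd, hlem.1]
            cases minList none (candsFrom dictionary md maxw pi.toList 1 (pi.toList.length - 1)) with
            | none => rfl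
            | some mm => rw [PySem.Str.len_eq]; rfl
          set st := loopA dictionary (fun q mm => helperAux dictionary fuel q mm) pi 1 none m
          have hgood := good_insert dictionary md maxw st.2 hlem.2 pi hmd
          rw [← hv] at hgood
          dsimp only
          cases hst : st.1 with
          | none =>
            rw [hst] at hv hgood
            exact ⟨hv, hgood⟩
          | some mm =>
            rw [hst] at hv hgood
            exact ⟨hv, hgood⟩

-- ===== VERDICT (by name: the statement is the Claim_ definition above) =====
theorem helper_spec : Claim_equal_helper := by
  intro pi dictionary memo _
  unfold Spec_helper helper helper_alt
  have hmax := PySem.List.le_foldl_max_int dictionary (fun w => PySem.Str.len w) 0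
  have h := thmA dictionary (PySem.Dict.ofList memo)
      (dictionary.foldl (fun a w => max a (PySem.Str.len w)) 0)
      hmax.1 (by intro w hw; simpa [PySem.Str.len_eq] using hmax.2 w hw)
      (pi.toList.length + 1) pi (PySem.Dict.ofList memo) (by omega) (fun k => Or.inl rfl)
  simpa [Wv] using h.1
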